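-- pv_equiv track=rewrite | github.com/vATCSCC/PERTI | adl/reference_data/generate_base_transitions.py | find_common_suffix
-- ===== SOURCE A (Python) =====
-- def find_common_suffix(routes):
--     """
--     Find common suffix of routes (for STARs - routes converge at end).
--     Returns list of unique common waypoints from the end.
--     """
--     if not routes or len(routes) < 2:
--         return []
--
--     # Convert routes to lists of waypoints (reversed for suffix comparison)
--     waypoint_arrays = []
--     for route in routes:
--         waypoints = route.split()
--         # Remove any duplicate consecutive waypoints
--         cleaned = []
--         for wp in waypoints:
--             if not cleaned or cleaned[-1] != wp:
--                 cleaned.append(wp)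
--         waypoint_arrays.append(list(reversed(cleaned)))
--
--     if not waypoint_arrays:
--         return []
--
--     # Find minimum length
--     min_len = min(len(arr) for arr in waypoint_arrays)
--     if min_len == 0:
--         return []
--
--     # Find common suffix length
--     common_len = 0
--     for i in range(min_len):
--         current = waypoint_arrays[0][i]
--         if all(arr[i] == current for arr in waypoint_arrays):
--             common_len += 1
--         else:
--             break
--
--     if common_len == 0:
--         return []
--
--     # Return common suffix (un-reversed)
--     return list(reversed(waypoint_arrays[0][:common_len]))
-- ===== SOURCE B (Python) =====
-- def _clean(route):
--     out = []
--     for wp in route.split():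
--         if not out or out[-1] != wp:
--             out.append(wp)
--     return out
--
--
-- def _shared_suffix(xs, ys):
--     n = 0
--     for a, b in zip(reversed(xs), reversed(ys)):
--         if a != b:
--             break
--         n += 1
--     return xs[len(xs) - n:]
--
--
-- def find_common_suffix(routes):
--     if len(routes) < 2:
--         return []
--     cleaned = [_clean(r) for r in routes]
--     acc = cleaned[0]
--     for r in cleaned[1:]:
--         acc = _shared_suffix(acc, r)
--     return acc
-- ===== Notes on version B (the rewrite author's own statement) =====
-- stated objective: alternative
-- what changed: Replaces the reverse/min-length/column-scan over all routes with a pairwise fold: the accumulator starts as the first cleaned route and is repeatedly cut down to the longest shared suffix with each remaining cleaned route, so the result needs no final reversal.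
import Mathlib
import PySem

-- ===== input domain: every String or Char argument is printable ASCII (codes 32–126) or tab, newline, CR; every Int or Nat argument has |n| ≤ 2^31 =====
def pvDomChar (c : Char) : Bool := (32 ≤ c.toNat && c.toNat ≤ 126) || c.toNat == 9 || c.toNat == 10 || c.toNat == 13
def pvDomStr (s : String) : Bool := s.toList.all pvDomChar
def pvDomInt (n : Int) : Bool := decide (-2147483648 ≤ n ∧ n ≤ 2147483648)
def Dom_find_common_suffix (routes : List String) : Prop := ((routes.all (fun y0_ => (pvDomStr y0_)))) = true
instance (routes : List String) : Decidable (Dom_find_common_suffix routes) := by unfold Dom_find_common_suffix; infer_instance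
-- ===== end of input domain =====

-- B replaces A's reverse+min-length+column scan with a pairwise fold that trims an
-- accumulator to the longest shared suffix with each route (objective: alternative).

-- ===== PORT A =====
-- the inner `for wp in waypoints` cleaning loop of A
def aClean (route : String) : List String :=
  (PySem.Str.split₀ route).foldl
    (fun cleaned wp =>
      if cleaned.isEmpty || (PySem.List.pyGet? cleaned (-1) != some wp) then cleaned ++ [wp]
      else cleaned) []

-- the `for i in range(min_len)` loop with its break, counting common_len
def aScan (arrs : List (List String)) (a0 : List String) : Nat → Nat → Nat
  | _, 0 => 0
  | i, fuel + 1 =>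
    if arrs.all (fun arr => arr[i]? == a0[i]?) then aScan arrs a0 (i + 1) fuel + 1 else 0

def find_common_suffix (routes : List String) : List String :=
  if routes.length < 2 then []
  else
    match routes.map (fun route => (aClean route).reverse) with
    | [] => []
    | a0 :: rest =>
      let min_len := rest.foldl (fun m arr => min m arr.length) a0.length
      if min_len = 0 then []
      else
        let common_len := aScan (a0 :: rest) a0 0 min_len
        if common_len = 0 then [] else (a0.take common_len).reverse

-- ===== PORT B =====
def pvClean (route : String) : List String :=
  (PySem.Str.split₀ route).foldl
    (fun out wp =>
      if out.isEmpty || (PySem.List.pyGet? out (-1) != some wp) then out ++ [wp]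
      else out) []

-- the `for a, b in zip(reversed(xs), reversed(ys))` counting loop
def pvSuffLen : List String → List String → Nat
  | a :: as_, b :: bs => if a = b then pvSuffLen as_ bs + 1 else 0
  | _, _ => 0

def pvShared (xs ys : List String) : List String :=
  xs.drop (xs.length - pvSuffLen xs.reverse ys.reverse)

def find_common_suffix_alt (routes : List String) : List String :=
  if routes.length < 2 then []
  else
    match routes.map pvClean with
    | [] => []
    | c0 :: cs => cs.foldl pvShared c0

-- ===== PRECONDITION & SPEC =====
def Spec_find_common_suffix (routes : List String) (out : List String) : Prop := out = find_common_suffix_alt routes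
instance (routes : List String) (out : List String) : Decidable (Spec_find_common_suffix routes out) := by unfold Spec_find_common_suffix; infer_instance

-- ===== CLAIM (what is proved, stated in full; the proofs are below) =====
def Claim_equal_find_common_suffix : Prop := ∀ (routes : List String), Dom_find_common_suffix routes → Spec_find_common_suffix routes (find_common_suffix routes)

-- ===== LEMMAS AND PROOFS =====

-- canonical longest common prefix, used only by the proofs
def lcp : List String → List String → List String
  | a :: as_, b :: bs => if a = b then a :: lcp as_ bs else []
  | _, _ => []

-- "p is the longest common prefix of a0 and every member of rest"
def IsLCP (a0 : List String) (rest : List (List String)) (p : List String) : Prop :=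
  p <+: a0 ∧ (∀ b ∈ rest, p <+: b) ∧
    ∀ q, q <+: a0 → (∀ b ∈ rest, q <+: b) → q.length ≤ p.length

theorem pvSuffLen_eq_lcp_length (xs ys : List String) :
    pvSuffLen xs ys = (lcp xs ys).length := by
  induction xs generalizing ys with
  | nil => cases ys <;> simp [pvSuffLen, lcp]
  | cons a as ih =>
    cases ys with
    | nil => simp [pvSuffLen, lcp]
    | cons b bs =>
      by_cases h : a = b <;> simp [pvSuffLen, lcp, h, ih]

theorem lcp_prefix_left (xs ys : List String) : lcp xs ys <+: xs := by
  induction xs generalizing ys with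
  | nil => cases ys <;> simp [lcp]
  | cons a as ih =>
    cases ys with
    | nil => simp [lcp]
    | cons b bs =>
      by_cases h : a = b
      · simp only [lcp, h, if_true]
        exact (List.cons_prefix_cons).2 ⟨rfl, ih bs⟩
      · simp [lcp, h]

theorem lcp_prefix_right (xs ys : List String) : lcp xs ys <+: ys := by
  induction xs generalizing ys with
  | nil => cases ys <;> simp [lcp]
  | cons a as ih =>
    cases ys with
    | nil => simp [lcp]
    | cons b bs =>
      by_cases h : a = b
      · subst h
        simp only [lcp]
        exact (List.cons_prefix_cons).2 ⟨rfl, ih bs⟩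
      · simp [lcp, h]

theorem lcp_max {q xs ys : List String} (h1 : q <+: xs) (h2 : q <+: ys) : q <+: lcp xs ys := by
  induction q generalizing xs ys with
  | nil => simp
  | cons c cs ih =>
    obtain ⟨t1, rfl⟩ := h1
    obtain ⟨t2, h2⟩ := h2
    cases ys with
    | nil => simp at h2
    | cons b bs =>
      rw [List.cons_append] at h2
      obtain ⟨rfl, rfl⟩ := List.cons.inj h2
      simp only [List.cons_append, lcp]
      exact (List.cons_prefix_cons).2 ⟨rfl, ih ⟨t1, rfl⟩ ⟨t2, rfl⟩⟩

theorem pvShared_eq (xs ys : List String) :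
    pvShared xs ys = (lcp xs.reverse ys.reverse).reverse := by
  have hl : lcp xs.reverse ys.reverse = xs.reverse.take (lcp xs.reverse ys.reverse).length :=
    List.prefix_iff_eq_take.1 (lcp_prefix_left _ _)
  rw [pvShared, pvSuffLen_eq_lcp_length]
  conv_rhs => rw [hl, List.take_reverse]
  simp

theorem foldl_pvShared_eq (c0 : List String) (cs : List (List String)) :
    cs.foldl pvShared c0 = (cs.foldl (fun acc r => lcp acc r.reverse) c0.reverse).reverse := by
  induction cs generalizing c0 with
  | nil => simp
  | cons r cs ih =>
    simp only [List.foldl_cons]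
    rw [ih (pvShared c0 r), pvShared_eq]
    simp

theorem isLCP_foldl (a0 : List String) (rest : List (List String)) :
    IsLCP a0 rest (rest.foldl lcp a0) := by
  induction rest generalizing a0 with
  | nil =>
    exact ⟨List.prefix_refl _, by simp, fun q hq _ => hq.length_le⟩
  | cons b rest ih =>
    obtain ⟨h1, h2, h3⟩ := ih (lcp a0 b)
    simp only [List.foldl_cons]
    refine ⟨h1.trans (lcp_prefix_left _ _), ?_, ?_⟩
    · intro b' hb'
      rcases List.mem_cons.1 hb' with rfl | hb'
      · exact h1.trans (lcp_prefix_right _ _)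
      · exact h2 b' hb'
    · intro q hqa hqb
      exact h3 q (lcp_max hqa (hqb b (List.mem_cons_self ..)))
        (fun c hc => hqb c (List.mem_cons_of_mem _ hc))

theorem isLCP_unique {a0 : List String} {rest : List (List String)} {p q : List String}
    (hp : IsLCP a0 rest p) (hq : IsLCP a0 rest q) : p = q := by
  obtain ⟨hp1, hp2, hp3⟩ := hp
  obtain ⟨hq1, hq2, hq3⟩ := hq
  have hlen : p.length = q.length := le_antisymm (hq3 p hp1 hp2) (hp3 q hq1 hq2)
  rw [List.prefix_iff_eq_take.1 hp1, List.prefix_iff_eq_take.1 hq1, hlen]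

-- the foldl-min of A's `min_len` line: bounds in both directions
theorem minfold_le (rest : List (List String)) (init : Nat) :
    rest.foldl (fun m arr => min m arr.length) init ≤ init ∧
      ∀ b ∈ rest, rest.foldl (fun m arr => min m arr.length) init ≤ b.length := by
  induction rest generalizing init with
  | nil => simp
  | cons c rest ih =>
    obtain ⟨ih1, ih2⟩ := ih (min init c.length)
    refine ⟨ih1.trans (Nat.min_le_left _ _), ?_⟩
    intro b hb
    rcases List.mem_cons.1 hb with rfl | hb
    · exact ih1.trans (Nat.min_le_right _ _)
    · exact ih2 b hb

theorem le_minfold (rest : List (List String)) (init k : Nat)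
    (h1 : k ≤ init) (h2 : ∀ b ∈ rest, k ≤ b.length) :
    k ≤ rest.foldl (fun m arr => min m arr.length) init := by
  induction rest generalizing init with
  | nil => simpa
  | cons c rest ih =>
    exact ih (min init c.length)
      (le_min h1 (h2 c (List.mem_cons_self ..)))
      (fun b hb => h2 b (List.mem_cons_of_mem _ hb))

-- characterisation of A's `for i in range(min_len)` loop
theorem aScan_spec (arrs : List (List String)) (a0 : List String) (i fuel : Nat) :
    aScan arrs a0 i fuel ≤ fuel ∧
      (∀ j < aScan arrs a0 i fuel, arrs.all (fun arr => arr[i + j]? == a0[i + j]?) = true) ∧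
      (aScan arrs a0 i fuel < fuel →
        arrs.all (fun arr => arr[i + aScan arrs a0 i fuel]? == a0[i + aScan arrs a0 i fuel]?) = false) := by
  induction fuel generalizing i with
  | zero => simp [aScan]
  | succ fuel ih =>
    by_cases h : arrs.all (fun arr => arr[i]? == a0[i]?)
    · obtain ⟨ih1, ih2, ih3⟩ := ih (i + 1)
      simp only [aScan, h, if_true]
      refine ⟨by omega, ?_, ?_⟩
      · intro j hj
        cases j with
        | zero => simpa using h
        | succ j' =>
          have := ih2 j' (by omega)
          simpa [Nat.add_assoc, Nat.add_comm 1 j'] using this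
      · intro hlt
        have := ih3 (by omega)
        simpa [Nat.add_assoc, Nat.add_comm 1 (aScan arrs a0 (i + 1) fuel)] using this
    · have h0 : aScan arrs a0 i (fuel + 1) = 0 := by
        simp only [aScan, if_neg h]
      rw [h0]
      exact ⟨by omega, fun j hj => absurd hj (Nat.not_lt_zero j),
        fun _ => by simpa using eq_false_of_ne_true h⟩

theorem prefix_getElem? {q l : List String} (h : q <+: l) {n : Nat} (hn : n < q.length) :
    l[n]? = q[n]? := by
  obtain ⟨t, rfl⟩ := h
  rw [List.getElem?_append_left hn]

-- A's take-of-scan equals the foldl multi-way LCP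
theorem main_take (a0 : List String) (rest : List (List String)) :
    a0.take (aScan (a0 :: rest) a0 0 (rest.foldl (fun m arr => min m arr.length) a0.length)) =
      rest.foldl lcp a0 := by
  set ml := rest.foldl (fun m arr => min m arr.length) a0.length with hml
  set n := aScan (a0 :: rest) a0 0 ml with hn
  obtain ⟨hml1, hml2⟩ := minfold_le rest a0.length
  obtain ⟨hs1, hs2, hs3⟩ := aScan_spec (a0 :: rest) a0 0 ml
  rw [← hml] at hml1 hml2
  rw [← hn] at hs1 hs2 hs3
  simp only [Nat.zero_add] at hs2 hs3
  have hna : n ≤ a0.length := hs1.trans hml1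
  have hlen_take : (a0.take n).length = n := by simp [hna]
  refine isLCP_unique (a0 := a0) (rest := rest) ?_ (isLCP_foldl a0 rest)
  refine ⟨List.take_prefix _ _, ?_, ?_⟩
  · -- common prefix of every b ∈ rest
    intro b hb
    have hnb : n ≤ b.length := hs1.trans (hml2 b hb)
    rw [List.prefix_iff_eq_take, hlen_take]
    apply List.ext_getElem?
    intro j
    rcases Nat.lt_or_ge j n with hj | hj
    · rw [List.getElem?_take_of_lt hj, List.getElem?_take_of_lt hj]
      have hall := hs2 j hj
      rw [List.all_eq_true] at hall
      have := hall b (List.mem_cons_of_mem _ hb)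
      simp only [beq_iff_eq] at this
      exact this.symm
    · rw [List.getElem?_eq_none (by simpa [hna] using hj),
        List.getElem?_eq_none (by simpa [hnb] using hj)]
  · -- maximality
    intro q hqa hqb
    by_contra hgt
    rw [Nat.not_le] at hgt
    rw [hlen_take] at hgt
    have hql : n < q.length := hgt
    have hnml : n < ml := by
      have : n + 1 ≤ ml := le_minfold rest a0.length (n + 1)
        (by have := hqa.length_le; omega)
        (fun b hb => by have := (hqb b hb).length_le; omega)
      omega
    have hfalse := hs3 hnml
    have htrue : ((a0 :: rest).all (fun arr => arr[n]? == a0[n]?)) = true := by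
      rw [List.all_eq_true]
      intro arr harr
      have hq : q <+: arr := by
        rcases List.mem_cons.1 harr with rfl | h
        · exact hqa
        · exact hqb arr h
      rw [prefix_getElem? hq hql, prefix_getElem? hqa hql]
      exact beq_self_eq_true _
    rw [htrue] at hfalse
    cases hfalse

theorem pvClean_eq_aClean : pvClean = aClean := rfl

-- ===== VERDICT =====
theorem find_common_suffix_spec : Claim_equal_find_common_suffix := by
  intro routes _
  unfold Spec_find_common_suffix
  by_cases h2 : routes.length < 2
  · cases routes with
    | nil => simp [find_common_suffix, find_common_suffix_alt]
    | cons r0 rs =>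
      unfold find_common_suffix find_common_suffix_alt
      rw [if_pos h2, if_pos h2]
  · cases routes with
    | nil => simp at h2
    | cons r0 rs =>
      have hA : find_common_suffix (r0 :: rs) =
          (if (rs.map (fun r => (aClean r).reverse)).foldl (fun m arr => min m arr.length)
                (aClean r0).reverse.length = 0 then []
           else if aScan ((aClean r0).reverse :: rs.map (fun r => (aClean r).reverse))
                  (aClean r0).reverse 0
                  ((rs.map (fun r => (aClean r).reverse)).foldl (fun m arr => min m arr.length)
                    (aClean r0).reverse.length) = 0 then []
           else ((aClean r0).reverse.take
                  (aScan ((aClean r0).reverse :: rs.map (fun r => (aClean r).reverse))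
                    (aClean r0).reverse 0
                    ((rs.map (fun r => (aClean r).reverse)).foldl (fun m arr => min m arr.length)
                      (aClean r0).reverse.length))).reverse) := by
        unfold find_common_suffix
        rw [if_neg h2]
        simp only [List.map_cons]
      have hB : find_common_suffix_alt (r0 :: rs) =
          ((rs.map (fun r => (aClean r).reverse)).foldl lcp (aClean r0).reverse).reverse := by
        unfold find_common_suffix_alt
        rw [if_neg h2]
        show (rs.map pvClean).foldl pvShared (pvClean r0) = _
        rw [foldl_pvShared_eq, List.foldl_map, List.foldl_map, pvClean_eq_aClean]
      rw [hA, hB, ← main_take (aClean r0).reverse (rs.map (fun r => (aClean r).reverse))]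
      set a0 := (aClean r0).reverse with ha0
      set rest := rs.map (fun r => (aClean r).reverse) with hrest
      set ml := rest.foldl (fun m arr => min m arr.length) a0.length with hml
      set n := aScan (a0 :: rest) a0 0 ml with hn
      have hle : n ≤ ml := (aScan_spec (a0 :: rest) a0 0 ml).1
      split_ifs with hml0 hn0
      · have : n = 0 := by omega
        rw [this]
        simp
      · rw [hn0]
        simp
      · rfl
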